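-- pv_equiv track=rewrite | github.com/adanzl/leetcode-practice | py/q1700/Q1702.py | maximumBinaryString1
-- ===== SOURCE A (Python) =====
-- def maximumBinaryString1(binary: str) -> str:
--     n = len(binary)
--     bb = list(binary)
--     ans = []
--     id_0 = []
--     for i in range(n - 1, -1, -1):
--         if binary[i] == '0':
--             id_0.append(i)
--     for i in range(n - 1):
--         if len(id_0) == 0:
--             ans.extend(['1'] * (n - i))
--             return ''.join(ans)
--         v = bb[i:i + 2]
--         if v[0] == '0' and v[1] == '0':
--             ans.append("1")
--             id_0.pop()
--         elif v[0] == '1' and v[1] == '0':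
--             ans.append("1")
--         elif v[0] == '0' and v[1] == '1':
--             if len(id_0) > 1:
--                 id_0.pop()
--                 ii = id_0.pop()
--                 ans.append('1')
--                 bb[ii] = '1'
--                 bb[i + 1] = '0'
--                 id_0.append(i + 1)
--             else:
--                 ans.append('0')
--                 ans.extend(['1'] * (n - i - 1))
--                 return ''.join(ans)
--         else:  # '11'
--             ans.append('1')
--     if id_0:
--         ans.append('0')
--     else:
--         ans.append('1')
--     return ''.join(ans)
-- ===== SOURCE B (Python) =====
-- def maximumBinaryString1(binary: str) -> str:
--     n = len(binary)
--     if n == 0: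
--         return ''
--     k = binary.count('0')
--     if k == 0:
--         return '1' * n
--     p = binary.index('0')
--     return '1' * (p + k - 1) + '0' + '1' * (n - p - k)
-- ===== Notes on version B (the rewrite author's own statement) =====
-- stated objective: faster
-- what changed: Replaced A's backward zero-index collection plus forward two-character stack simulation (with in-place list rewrites) by the closed form: with k zeros and the first zero at index p, the answer is ones repeated p+k-1, then a single zero, then ones repeated n-p-k (all ones when no zero occurs); the per-character interpreted loop becomes three C-level primitives (count, index, string repetition).
-- intended difference: On the empty string A returns a one-character string of a one (an artefact of its final append with an empty zero stack) while B returns the empty string, the only binary string obtainable from empty input. — e.g. on maximumBinaryString1(""): A returns "1", B returns ""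
-- outside the precondition, e.g. on maximumBinaryString1('0x'): A returns '10', B returns '01'
import Mathlib
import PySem

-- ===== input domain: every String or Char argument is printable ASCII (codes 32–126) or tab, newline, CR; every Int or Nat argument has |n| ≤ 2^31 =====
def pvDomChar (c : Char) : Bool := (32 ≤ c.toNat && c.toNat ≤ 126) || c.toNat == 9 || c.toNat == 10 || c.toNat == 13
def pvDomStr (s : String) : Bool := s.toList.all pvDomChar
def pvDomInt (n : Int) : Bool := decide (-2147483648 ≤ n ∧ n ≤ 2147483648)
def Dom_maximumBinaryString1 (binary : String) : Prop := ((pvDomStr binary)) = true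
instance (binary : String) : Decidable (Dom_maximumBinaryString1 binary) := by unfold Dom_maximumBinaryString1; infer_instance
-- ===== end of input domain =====

-- B (measured faster, constant-factor) replaces A's backward zero-index collection + forward
-- stack simulation by the closed form: ones repeated p+k-1, a single zero, ones repeated n-p-k
-- (k = zero count, p = first zero); on the empty string B returns the empty string where A
-- returns a single one (see D_).

-- ===== PORT A =====
-- id_0: for i in range(n-1,-1,-1): if binary[i]=='0': id_0.append(i)
def pvBuildId0 (l : List Char) : List Nat :=
  ((List.range l.length).reverse).foldl
    (fun acc i => if l.getD i ' ' = '0' then acc ++ [i] else acc) []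

-- A's 'for i in range(n-1)' loop with its early returns; fuel = number of remaining iterations
-- (n-1-i), so the recursion is structural; id_0 pops from the end; the in-place writes
-- bb[ii]='1', bb[i+1]='0' are ported as List.set.
def pvLoopA (n : Nat) : Nat → Nat → List Char → List Nat → List Char → List Char
  | 0, _, _, id0, ans => if id0.length ≠ 0 then ans ++ ['0'] else ans ++ ['1']
  | fuel + 1, i, bb, id0, ans =>
    if id0.length = 0 then ans ++ List.replicate (n - i) '1'
    else
      let v0 := bb.getD i ' '
      let v1 := bb.getD (i + 1) ' '
      if v0 = '0' ∧ v1 = '0' then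
        pvLoopA n fuel (i + 1) bb id0.dropLast (ans ++ ['1'])
      else if v0 = '1' ∧ v1 = '0' then
        pvLoopA n fuel (i + 1) bb id0 (ans ++ ['1'])
      else if v0 = '0' ∧ v1 = '1' then
        if 1 < id0.length then
          let t1 := id0.dropLast
          let ii := t1.getLast?.getD 0
          pvLoopA n fuel (i + 1) ((bb.set ii '1').set (i + 1) '0') (t1.dropLast ++ [i + 1]) (ans ++ ['1'])
        else ans ++ '0' :: List.replicate (n - i - 1) '1'
      else pvLoopA n fuel (i + 1) bb id0 (ans ++ ['1'])

def maximumBinaryString1 (binary : String) : String :=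
  let l := binary.toList
  String.ofList (pvLoopA l.length (l.length - 1) 0 l (pvBuildId0 l) [])

-- ===== PORT B =====
def maximumBinaryString1_alt (binary : String) : String :=
  let l := binary.toList
  let n := l.length
  if n = 0 then ""
  else
    let k := l.count '0'
    if k = 0 then String.ofList (List.replicate n '1')
    else
      let p := l.idxOf '0'
      String.ofList (List.replicate (p + k - 1) '1' ++ '0' :: List.replicate (n - p - k) '1')

-- ===== PRECONDITION & SPEC =====
-- Pre_ excludes strings that contain a character which is neither zero nor one at or after the
-- first zero character: on those A still returns, but its zero-index stack keeps stale entries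
-- for zeros it walked past, an accident of its branch structure outside the task's natural
-- domain (binary strings). Characters before the first zero behave exactly like ones in A and
-- are admitted, as are strings with no zero character at all.
def Pre_maximumBinaryString1 (binary : String) : Prop :=
  ((binary.toList.drop (binary.toList.idxOf '0')).all (fun c => c == '0' || c == '1')) = true
instance (binary : String) : Decidable (Pre_maximumBinaryString1 binary) := by
  unfold Pre_maximumBinaryString1; infer_instance

def pvWitness_maximumBinaryString1 : String := "010"

-- On the empty string A returns a one-character string of a one (an artefact of its final
-- append with an empty zero stack) while B returns the empty string, the only binary string
-- obtainable from empty input.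
def D_maximumBinaryString1 (binary : String) : Prop := binary = ""
instance (binary : String) : Decidable (D_maximumBinaryString1 binary) := by
  unfold D_maximumBinaryString1; infer_instance

def Spec_maximumBinaryString1 (binary : String) (out : String) : Prop :=
  ¬ D_maximumBinaryString1 binary → out = maximumBinaryString1_alt binary
instance (binary : String) (out : String) : Decidable (Spec_maximumBinaryString1 binary out) := by
  unfold Spec_maximumBinaryString1; infer_instance

def pvDiffWitness_maximumBinaryString1 : String := ""
def pvDiffWitnessOut_maximumBinaryString1 : String × String := ("1", "")

-- ===== CLAIM (what is proved, stated in full; the proofs are below) =====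
def Claim_unchanged_maximumBinaryString1 : Prop := ∀ (binary : String), Dom_maximumBinaryString1 binary → Pre_maximumBinaryString1 binary → Spec_maximumBinaryString1 binary (maximumBinaryString1 binary)
def Claim_changed_maximumBinaryString1 : Prop := Dom_maximumBinaryString1 (pvDiffWitness_maximumBinaryString1) ∧ Pre_maximumBinaryString1 (pvDiffWitness_maximumBinaryString1) ∧ D_maximumBinaryString1 (pvDiffWitness_maximumBinaryString1) ∧ maximumBinaryString1 (pvDiffWitness_maximumBinaryString1) = pvDiffWitnessOut_maximumBinaryString1.1 ∧ maximumBinaryString1_alt (pvDiffWitness_maximumBinaryString1) = pvDiffWitnessOut_maximumBinaryString1.2 ∧ pvDiffWitnessOut_maximumBinaryString1.1 ≠ pvDiffWitnessOut_maximumBinaryString1.2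
def Claim_exact_maximumBinaryString1 : Prop := ∀ (binary : String), Dom_maximumBinaryString1 binary → Pre_maximumBinaryString1 binary → D_maximumBinaryString1 binary → maximumBinaryString1 binary ≠ maximumBinaryString1_alt binary

-- ===== LEMMAS AND PROOFS =====

-- ascending list of the positions (absolute, offset m) of the '0' characters of a suffix
def pvZ : List Char → Nat → List Nat
  | [], _ => []
  | c :: t, m => if c = '0' then m :: pvZ t (m + 1) else pvZ t (m + 1)

theorem pvZ_ge : ∀ (l : List Char) (m x : Nat), x ∈ pvZ l m → m ≤ x := by
  intro l
  induction l with
  | nil => intro m x h; simp [pvZ] at h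
  | cons c t ih =>
    intro m x h
    simp only [pvZ] at h
    split at h
    · rcases List.mem_cons.mp h with h | h
      · omega
      · have := ih (m + 1) x h; omega
    · have := ih (m + 1) x h; omega

theorem pvZ_lt : ∀ (l : List Char) (m x : Nat), x ∈ pvZ l m → x < m + l.length := by
  intro l
  induction l with
  | nil => intro m x h; simp [pvZ] at h
  | cons c t ih =>
    intro m x h
    simp only [pvZ] at h
    split at h
    · rcases List.mem_cons.mp h with h | h
      · simp [h]
      · have := ih (m + 1) x h; simp only [List.length_cons]; omega
    · have := ih (m + 1) x h; simp only [List.length_cons]; omega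

theorem getD_set_set (bb : List Char) (j i1 j' : Nat) (a b : Char)
    (hj : j < bb.length) (hj' : j' < bb.length) :
    ((bb.set j a).set i1 b).getD j' ' '
      = if j' = i1 then b else if j' = j then a else bb.getD j' ' ' := by
  by_cases h1 : j' = i1
  · subst h1
    rw [if_pos rfl, List.getD_eq_getElem _ _ (by simpa using hj')]
    exact List.getElem_set_self (by simpa using hj')
  · rw [if_neg h1, List.getD_eq_getElem _ _ (by simpa using hj')]
    rw [List.getElem_set, if_neg (fun h => h1 h.symm)]
    rw [List.getElem_set]
    by_cases h2 : j = j'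
    · rw [if_pos h2, if_pos h2.symm]
    · rw [if_neg h2, if_neg (fun h => h2 h.symm), List.getD_eq_getElem _ _ hj']

theorem pvZ_mem_zero : ∀ (l : List Char) (m x : Nat), x ∈ pvZ l m → l.getD (x - m) ' ' = '0' := by
  intro l
  induction l with
  | nil => intro m x h; simp [pvZ] at h
  | cons c t ih =>
    intro m x h
    simp only [pvZ] at h
    by_cases hc : c = '0'
    · rw [if_pos hc] at h
      rcases List.mem_cons.mp h with h | h
      · rw [h, Nat.sub_self, List.getD_cons_zero, hc]
      · have hge := pvZ_ge t (m + 1) x h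
        rw [show x - m = (x - (m + 1)) + 1 by omega, List.getD_cons_succ]
        exact ih (m + 1) x h
    · rw [if_neg hc] at h
      have hge := pvZ_ge t (m + 1) x h
      rw [show x - m = (x - (m + 1)) + 1 by omega, List.getD_cons_succ]
      exact ih (m + 1) x h

theorem pvZ_length : ∀ (l : List Char) (m : Nat), (pvZ l m).length = l.count '0' := by
  intro l
  induction l with
  | nil => intro m; simp [pvZ]
  | cons c t ih =>
    intro m
    by_cases hc : c = '0'
    · simp [pvZ, hc, ih (m + 1)]
    · have hb : (c == '0') = false := by simp [hc]
      simp [pvZ, hc, ih (m + 1), hb]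

theorem pvZ_head : ∀ (l : List Char) (m q : Nat) (rest : List Nat),
    pvZ l m = q :: rest → q = m + l.idxOf '0' := by
  intro l
  induction l with
  | nil => intro m q rest h; simp [pvZ] at h
  | cons c t ih =>
    intro m q rest h
    simp only [pvZ] at h
    by_cases hc : c = '0'
    · rw [if_pos hc] at h
      injection h with h1 _
      simp [hc, ← h1]
    · rw [if_neg hc] at h
      have := ih (m + 1) q rest h
      have hne : ¬ (c == '0') = true := by simpa using hc
      simp [List.idxOf_cons, hne]
      omega

theorem pvZ_set_head : ∀ (l : List Char) (m j : Nat) (rest : List Nat),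
    pvZ l m = j :: rest → pvZ (l.set (j - m) '1') m = rest := by
  intro l
  induction l with
  | nil => intro m j rest h; simp [pvZ] at h
  | cons c t ih =>
    intro m j rest h
    simp only [pvZ] at h
    by_cases hc : c = '0'
    · rw [if_pos hc] at h
      injection h with h1 h2
      rw [show j - m = 0 by omega]
      simp [List.set, pvZ, h2]
    · rw [if_neg hc] at h
      have hge : m + 1 ≤ j := pvZ_ge t (m + 1) j (by rw [h]; exact List.mem_cons_self ..)
      rw [show j - m = (j - (m + 1)) + 1 by omega]
      simp only [List.set]
      simp only [pvZ, if_neg hc]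
      exact ih (m + 1) j rest h

theorem pvZ_shift : ∀ (l : List Char) (m : Nat), pvZ l m = (pvZ l 0).map (· + m) := by
  intro l
  induction l with
  | nil => intro m; simp [pvZ]
  | cons c t ih =>
    intro m
    by_cases hc : c = '0'
    · simp only [pvZ, if_pos hc, List.map_cons]
      congr 1
      · omega
      · rw [ih (m + 1), ih 1, List.map_map]
        apply List.map_congr_left; intro x _
        simp only [Function.comp_apply]; omega
    · simp only [pvZ, if_neg hc]
      rw [ih (m + 1), ih 1, List.map_map]
      apply List.map_congr_left; intro x _
      simp only [Function.comp_apply]; omega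

theorem pvZ_filter0 : ∀ (l : List Char),
    pvZ l 0 = (List.range l.length).filter (fun i => decide (l.getD i ' ' = '0')) := by
  intro l
  induction l with
  | nil => simp [pvZ]
  | cons c t ih =>
    simp only [List.length_cons, List.range_succ_eq_map, List.filter_cons]
    by_cases hc : c = '0'
    · simp only [pvZ, if_pos hc, List.getD_cons_zero, hc, decide_true, if_true]
      congr 1
      rw [pvZ_shift t 1, ih, List.filter_map]
      apply List.map_congr_left
      intro x _; simp
    · simp only [pvZ, if_neg hc]
      rw [List.getD_cons_zero, if_neg (by simpa using hc)]
      rw [pvZ_shift t 1, ih, List.filter_map]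
      apply List.map_congr_left
      intro x _; simp

theorem pvBuildId0_eq (l : List Char) : pvBuildId0 l = (pvZ l 0).reverse := by
  unfold pvBuildId0
  rw [PySem.List.foldl_append_ite_eq_filter (fun i => l.getD i ' ' = '0'), List.filter_reverse]
  rw [pvZ_filter0 l]
  simp

theorem drop_step (l : List Char) (i : Nat) (h : i < l.length) :
    l.drop i = l.getD i ' ' :: l.drop (i + 1) := by
  rw [List.getD_eq_getElem l ' ' h]
  exact List.drop_eq_getElem_cons h

theorem all_drop_getD (l : List Char) (p : Nat)
    (h : (l.drop p).all (fun c => c == '0' || c == '1') = true) :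
    ∀ j, p ≤ j → j < l.length → l.getD j ' ' = '0' ∨ l.getD j ' ' = '1' := by
  intro j hpj hjl
  have hlt : j - p < (l.drop p).length := by rw [List.length_drop]; omega
  have h1 : (l.drop p).getD (j - p) ' ' ∈ l.drop p := by
    rw [List.getD_eq_getElem _ _ hlt]
    exact List.getElem_mem _
  have h2 := (List.all_eq_true.mp h) _ h1
  have h3 : (l.drop p).getD (j - p) ' ' = l.getD j ' ' := by
    rw [List.getD_eq_getElem _ _ hlt, List.getD_eq_getElem _ _ hjl, List.getElem_drop]
    congr 1
    omega
  rw [h3] at h2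
  simpa using h2

-- main loop invariant: with q :: rest the ascending zero positions of bb from index i on,
-- and every character from position q on binary, A's loop produces
-- '1'^(q + |rest| - i) ++ '0' ++ '1'^(n - q - |rest| - 1)
theorem loop_main : ∀ (fuel i : Nat) (bb : List Char) (q : Nat) (rest : List Nat) (ans : List Char),
    (∀ j, q ≤ j → j < bb.length → (bb.getD j ' ' = '0' ∨ bb.getD j ' ' = '1')) →
    pvZ (bb.drop i) i = q :: rest →
    fuel = bb.length - 1 - i →
    pvLoopA bb.length fuel i bb ((q :: rest).reverse) ans
      = ans ++ (List.replicate (q + rest.length - i) '1'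
          ++ '0' :: List.replicate (bb.length - q - rest.length - 1) '1') := by
  intro fuel
  induction fuel with
  | zero =>
    intro i bb q rest ans hb hZ hfuel
    have hin : i < bb.length := by
      by_contra hn
      rw [List.drop_eq_nil_iff.mpr (by omega)] at hZ
      simp [pvZ] at hZ
    have hi : i = bb.length - 1 := by omega
    have hlen : (pvZ (bb.drop i) i).length ≤ 1 := by
      rw [pvZ_length]
      calc (bb.drop i).count '0' ≤ (bb.drop i).length := List.count_le_length
        _ ≤ 1 := by rw [List.length_drop]; omega
    have hrest : rest = [] := by
      rw [hZ, List.length_cons] at hlen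
      exact List.eq_nil_of_length_eq_zero (by omega)
    have hq_ge : i ≤ q := pvZ_ge _ _ _ (hZ ▸ List.mem_cons_self ..)
    have hq_lt : q < bb.length := by
      have hdrop : bb.drop i = bb.getD i ' ' :: bb.drop (i + 1) := drop_step bb i hin
      rw [hdrop] at hZ
      simp only [pvZ] at hZ
      have h2 : bb.drop (i + 1) = [] := List.drop_eq_nil_iff.mpr (by omega)
      rw [h2] at hZ
      simp only [pvZ] at hZ
      split at hZ
      · injection hZ with h1 _; omega
      · exact absurd hZ (by simp)
    subst hrest
    simp only [pvLoopA, List.reverse_cons, List.reverse_nil, List.nil_append]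
    rw [if_pos (by simp)]
    rw [show q + [].length - i = 0 by simp; omega,
        show bb.length - q - List.length [] - 1 = 0 by simp; omega]
    simp
  | succ fuel ih =>
    intro i bb q rest ans hb hZ hfuel
    have hin1 : i < bb.length - 1 := by omega
    have hin : i < bb.length := by omega
    have hin' : i + 1 < bb.length := by omega
    have hd0 : bb.drop i = bb.getD i ' ' :: bb.drop (i + 1) := drop_step bb i hin
    have hd1 : bb.drop (i + 1) = bb.getD (i + 1) ' ' :: bb.drop (i + 2) := drop_step bb (i + 1) hin'
    have hq_ge : i ≤ q := pvZ_ge _ _ _ (hZ ▸ List.mem_cons_self ..)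
    have hq0 : (bb.drop i).getD (q - i) ' ' = '0' :=
      pvZ_mem_zero _ _ _ (hZ ▸ List.mem_cons_self ..)
    have hlennz : ¬ ((q :: rest).reverse.length = 0) := by simp
    rw [hd0] at hZ
    simp only [pvZ] at hZ
    by_cases h0 : bb.getD i ' ' = '0'
    · -- bb[i] = '0'
      rw [if_pos h0] at hZ
      injection hZ with hqi hZ1
      have hb1 : bb.getD (i + 1) ' ' = '0' ∨ bb.getD (i + 1) ' ' = '1' :=
        hb (i + 1) (by omega) hin'
      rcases hb1 with h1 | h1
      · -- '00' branch
        rw [hd1] at hZ1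
        simp only [pvZ, if_pos h1] at hZ1
        rw [show i + 1 + 1 = i + 2 by omega] at hZ1
        have hrest : rest = (i + 1) :: pvZ (bb.drop (i + 2)) (i + 2) := hZ1.symm
        simp only [pvLoopA]
        rw [if_neg hlennz, if_pos ⟨h0, h1⟩]
        rw [List.reverse_cons, List.dropLast_concat]
        rw [hrest]
        have hZ' : pvZ (bb.drop (i + 1)) (i + 1) = (i + 1) :: pvZ (bb.drop (i + 2)) (i + 2) := by
          rw [hd1]
          simp only [pvZ, if_pos h1]
        rw [ih (i + 1) bb (i + 1) (pvZ (bb.drop (i + 2)) (i + 2)) (ans ++ ['1'])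
          (fun j hj hjl => hb j (by omega) hjl) hZ' (by omega)]
        rw [show (i + 1) + (pvZ (bb.drop (i + 2)) (i + 2)).length - (i + 1)
              = (pvZ (bb.drop (i + 2)) (i + 2)).length by omega]
        rw [show q + ((i + 1) :: pvZ (bb.drop (i + 2)) (i + 2)).length - i
              = (pvZ (bb.drop (i + 2)) (i + 2)).length + 1 by rw [List.length_cons]; omega]
        rw [show bb.length - q - ((i + 1) :: pvZ (bb.drop (i + 2)) (i + 2)).length - 1
              = bb.length - (i + 1) - (pvZ (bb.drop (i + 2)) (i + 2)).length - 1 by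
                rw [List.length_cons]; omega]
        simp [List.replicate_succ, List.append_assoc]
      · -- bb[i]='0', bb[i+1]='1'
        rw [hd1] at hZ1
        have hne : ¬ (bb.getD (i + 1) ' ' = '0') := by rw [h1]; decide
        simp only [pvZ, if_neg hne] at hZ1
        rw [show i + 1 + 1 = i + 2 by omega] at hZ1
        have c1 : ¬ (bb.getD i ' ' = '0' ∧ bb.getD (i + 1) ' ' = '0') :=
          fun hx => absurd (h1.symm.trans hx.2) (by decide)
        have c2 : ¬ (bb.getD i ' ' = '1' ∧ bb.getD (i + 1) ' ' = '0') :=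
          fun hx => absurd (h0.symm.trans hx.1) (by decide)
        simp only [pvLoopA]
        rw [if_neg hlennz, if_neg c1, if_neg c2, if_pos ⟨h0, h1⟩]
        cases hre : rest with
        | nil =>
          rw [if_neg (by simp)]
          subst hqi
          simp [hre]
        | cons j rest2 =>
          rw [if_pos (by simp)]
          rw [hre] at hZ1
          have hj_ge : i + 2 ≤ j := pvZ_ge _ _ _ (hZ1.symm ▸ List.mem_cons_self ..)
          rw [List.reverse_cons, List.dropLast_concat]
          rw [List.getLast?_reverse]
          simp only [List.head?_cons, Option.getD_some]
          rw [List.reverse_cons, List.dropLast_concat]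
          rw [show (rest2.reverse ++ [i + 1]) = ((i + 1) :: rest2).reverse by simp]
          set bb' := ((bb.set j '1').set (i + 1) '0') with hbb'
          have hlen' : bb'.length = bb.length := by simp [hbb']
          have hjlt : j < bb.length := by
            have := pvZ_lt (bb.drop (i + 2)) (i + 2) j
              (by rw [hZ1]; exact List.mem_cons_self ..)
            rw [List.length_drop] at this
            omega
          have hb' : ∀ j', i + 1 ≤ j' → j' < bb'.length →
              (bb'.getD j' ' ' = '0' ∨ bb'.getD j' ' ' = '1') := by
            intro j' hj' hjl'
            have hjl'' : j' < bb.length := by rw [hlen'] at hjl'; exact hjl'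
            rw [hbb', getD_set_set bb j (i + 1) j' '1' '0' hjlt hjl'']
            by_cases h1 : j' = i + 1
            · left; rw [if_pos h1]
            · rw [if_neg h1]
              by_cases h2 : j' = j
              · right; rw [if_pos h2]
              · rw [if_neg h2]
                exact hb j' (by omega) hjl''
          have hZ'' : pvZ (bb'.drop (i + 1)) (i + 1) = (i + 1) :: rest2 := by
            have hg : bb'.getD (i + 1) ' ' = '0' := by
              rw [hbb', getD_set_set bb j (i + 1) (i + 1) '1' '0' hjlt (by omega)]
              rw [if_pos rfl]
            rw [drop_step bb' (i + 1) (by rw [hlen']; omega), hg]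
            simp only [pvZ, if_true]
            congr 1
            show pvZ (bb'.drop (i + 2)) (i + 2) = rest2
            have hdd : bb'.drop (i + 2) = (bb.drop (i + 2)).set (j - (i + 2)) '1' := by
              rw [hbb', List.drop_set, if_pos (by omega), List.drop_set,
                  if_neg (by omega)]
            rw [hdd]
            exact pvZ_set_head (bb.drop (i + 2)) (i + 2) j rest2 hZ1
          have hrec := ih (i + 1) bb' (i + 1) rest2 (ans ++ ['1']) hb' hZ'' (by rw [hlen']; omega)
          rw [hlen'] at hrec
          rw [hrec]
          rw [show (i + 1) + rest2.length - (i + 1) = rest2.length by omega]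
          rw [show q + (j :: rest2).length - i = rest2.length + 1 by
            rw [List.length_cons]; omega]
          rw [show bb.length - q - (j :: rest2).length - 1
                = bb.length - (i + 1) - rest2.length - 1 by rw [List.length_cons]; omega]
          simp [List.replicate_succ, List.append_assoc]
    · -- bb[i] ≠ '0' (a '1' or any other character before the first zero)
      rw [if_neg h0] at hZ
      have hqne : q ≠ i := by
        intro he
        apply h0
        rw [he, Nat.sub_self, hd0, List.getD_cons_zero] at hq0
        exact hq0
      have hq_ge1 : i + 1 ≤ q := by omega
      have hcall := ih (i + 1) bb q rest (ans ++ ['1']) hb hZ (by omega)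
      have c1 : ¬ (bb.getD i ' ' = '0' ∧ bb.getD (i + 1) ' ' = '0') := fun hx => h0 hx.1
      have c3 : ¬ (bb.getD i ' ' = '0' ∧ bb.getD (i + 1) ' ' = '1') := fun hx => h0 hx.1
      simp only [pvLoopA]
      rw [if_neg hlennz, if_neg c1]
      by_cases hv : bb.getD i ' ' = '1' ∧ bb.getD (i + 1) ' ' = '0'
      · rw [if_pos hv, hcall]
        rw [show q + rest.length - i = (q + rest.length - (i + 1)) + 1 by omega]
        simp [List.replicate_succ, List.append_assoc]
      · rw [if_neg hv, if_neg c3, hcall]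
        rw [show q + rest.length - i = (q + rest.length - (i + 1)) + 1 by omega]
        simp [List.replicate_succ, List.append_assoc]

theorem loop_nil_zero (n i : Nat) (bb : List Char) (ans : List Char) :
    pvLoopA n 0 i bb [] ans = ans ++ ['1'] := by
  simp [pvLoopA]

theorem loop_nil_succ (n fuel i : Nat) (bb : List Char) (ans : List Char) :
    pvLoopA n (fuel + 1) i bb [] ans = ans ++ List.replicate (n - i) '1' := by
  simp [pvLoopA]

theorem toList_ne_nil (binary : String) (h : ¬ binary = "") : binary.toList ≠ [] := by
  intro hn
  apply h
  have := congrArg String.ofList hn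
  rwa [String.ofList_toList] at this

-- ===== VERDICT (by name: the statement is the Claim_ definition above) =====
theorem maximumBinaryString1_spec : Claim_unchanged_maximumBinaryString1 := by
  intro binary _hDom hPre hnD
  unfold D_maximumBinaryString1 at hnD
  unfold Pre_maximumBinaryString1 at hPre
  have hl : binary.toList ≠ [] := toList_ne_nil binary hnD
  have hn1 : 1 ≤ binary.toList.length := by
    cases h : binary.toList with
    | nil => exact absurd h hl
    | cons c t => simp [h]
  show maximumBinaryString1 binary = maximumBinaryString1_alt binary
  unfold maximumBinaryString1 maximumBinaryString1_alt
  simp only []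
  rw [pvBuildId0_eq]
  rw [if_neg (show ¬ (binary.toList.length = 0) by omega)]
  by_cases hz : binary.toList.count '0' = 0
  · -- no zeros: both sides are '1'*n
    have hZ : pvZ binary.toList 0 = [] :=
      List.eq_nil_of_length_eq_zero (by rw [pvZ_length]; exact hz)
    rw [hZ, List.reverse_nil, if_pos hz]
    cases hfuel : binary.toList.length - 1 with
    | zero =>
      rw [loop_nil_zero]
      have hlen1 : binary.toList.length = 1 := by omega
      rw [hlen1]
      rfl
    | succ m =>
      rw [loop_nil_succ, List.nil_append, Nat.sub_zero]
  · -- at least one zero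
    obtain ⟨q, rest, hZ⟩ : ∃ q rest, pvZ binary.toList 0 = q :: rest := by
      cases h : pvZ binary.toList 0 with
      | nil =>
        exfalso; apply hz
        rw [← pvZ_length binary.toList 0, h]; rfl
      | cons a b => exact ⟨a, b, rfl⟩
    rw [hZ, if_neg hz]
    have hp : binary.toList.idxOf '0' = q := by
      have := pvZ_head binary.toList 0 q rest hZ
      omega
    have hbin : ∀ j, q ≤ j → j < binary.toList.length →
        (binary.toList.getD j ' ' = '0' ∨ binary.toList.getD j ' ' = '1') := by
      intro j hqj hjl
      exact all_drop_getD _ _ hPre j (by omega) hjl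
    have hmain := loop_main (binary.toList.length - 1) 0 binary.toList q rest []
      hbin (by simpa using hZ) (by omega)
    rw [hmain]
    have hk : binary.toList.count '0' = rest.length + 1 := by
      rw [← pvZ_length binary.toList 0, hZ]; rfl
    rw [hk, hp]
    rw [show q + (rest.length + 1) - 1 = q + rest.length - 0 by omega]
    rw [show binary.toList.length - q - (rest.length + 1)
          = binary.toList.length - q - rest.length - 1 by omega]
    simp

set_option maxRecDepth 8192 in
theorem maximumBinaryString1_changed : Claim_changed_maximumBinaryString1 := by
  unfold Claim_changed_maximumBinaryString1; decide

set_option maxRecDepth 8192 in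
theorem maximumBinaryString1_tight : Claim_exact_maximumBinaryString1 := by
  intro binary _ _ hD
  unfold D_maximumBinaryString1 at hD
  subst hD
  decide
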